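-- pv_equiv track=rewrite | github.com/00yunyoung00/algorithm_study | programmers/lv1/72410.py | solution
-- ===== SOURCE A (Python) =====
-- def solution(new_id):
--     answer = ''
--
--     # 1단계
--     new_id=new_id.lower()
--
--     # 2단계
--     for char in new_id:
--         if char.isalnum() or char in ['-','_','.']:
--             answer+=char
--
--     # 3단계
--     while ".." in answer:
--         answer=answer.replace("..", ".")
--
--     # 4단계
--     if answer.startswith('.'):
--         answer=answer[1:]
--     if answer.endswith('.'):
--         answer=answer[:-1]
--
--     # 5단계
--     if len(answer)==0:
--         answer="a"
--
--     # 6단계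
--     if len(answer)>15:
--         answer=answer[:15]
--     if answer[-1]=='.':
--         answer=answer[:-1]
--
--     # 7단계
--     while len(answer)<3:
--         answer+=answer[-1]
--
--     return answer
-- ===== SOURCE B (Python) =====
-- def solution(new_id):
--     out = []
--     prev = ''
--     for ch in new_id.lower():
--         if ch.isalnum() or ch in '-_.':
--             if ch == '.' and prev == '.':
--                 continue
--             out.append(ch)
--             prev = ch
--     s = ''.join(out).strip('.')
--     if not s:
--         s = 'a'
--     s = s[:15].rstrip('.')
--     if len(s) < 3:
--         s += s[-1] * (3 - len(s))
--     return s
-- ===== Notes on version B (the rewrite author's own statement) =====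
-- stated objective: alternative
-- what changed: Fuses the character filter and the repeated replace-until-fixpoint rescans that collapse consecutive dots into one left-to-right pass that tracks the last appended character, and replaces the character-by-character padding loop with a single replicate; the strips and truncation become direct strip/slice/rstrip post-processing.
import Mathlib
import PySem

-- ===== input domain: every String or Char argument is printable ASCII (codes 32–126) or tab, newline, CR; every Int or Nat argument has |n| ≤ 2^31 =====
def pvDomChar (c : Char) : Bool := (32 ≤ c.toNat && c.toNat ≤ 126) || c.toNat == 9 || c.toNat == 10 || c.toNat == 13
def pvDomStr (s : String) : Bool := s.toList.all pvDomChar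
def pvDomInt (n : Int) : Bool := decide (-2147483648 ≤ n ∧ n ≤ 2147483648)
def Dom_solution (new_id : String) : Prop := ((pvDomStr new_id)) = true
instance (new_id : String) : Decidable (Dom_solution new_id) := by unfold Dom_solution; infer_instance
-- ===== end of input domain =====

-- B fuses A's filter pass and A's repeated ".."→"." replace-until-fixpoint rescans into one
-- left-to-right pass tracking the last appended character, and replaces the char-by-char
-- padding loop by a single replicate.

-- ===== PORT A =====
-- Helpers for port A's while-loop termination proof (cited by name in decreasing_by):
-- rep1 is one left-to-right non-overlapping pass of answer.replace("..","."), i.e. the shape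
-- of PySem.Chars.replace.go for old = "..", new = ".".
def rep1 : Nat → List Char → List Char
  | 0, l => l
  | _ + 1, [] => []
  | fuel + 1, c :: t =>
    if ['.', '.'].isPrefixOf (c :: t) then '.' :: rep1 fuel t.tail else c :: rep1 fuel t

theorem replaceGo_eq_rep1 (fuel : Nat) : ∀ (l acc : List Char),
    PySem.Chars.replace.go ['.', '.'] ['.'] fuel l acc = acc.reverse ++ rep1 fuel l := by
  induction fuel with
  | zero => intro l acc; simp [PySem.Chars.replace.go, rep1]
  | succ fuel ih =>
    intro l acc
    cases l with
    | nil => simp [PySem.Chars.replace.go, rep1]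
    | cons c t =>
      rw [PySem.Chars.replace.go, rep1]
      by_cases h : ['.', '.'].isPrefixOf (c :: t) = true
      · simp [h, ih, List.drop_one]
      · simp only [Bool.not_eq_true] at h
        simp [h, ih]

theorem replace_eq_rep1 (l : List Char) :
    PySem.Chars.replace l ['.', '.'] ['.'] = rep1 l.length l := by
  rw [PySem.Chars.replace]
  simp [replaceGo_eq_rep1]

theorem rep1_length_le (fuel : Nat) : ∀ l : List Char, (rep1 fuel l).length ≤ l.length := by
  induction fuel with
  | zero => intro l; simp [rep1]
  | succ fuel ih =>
    intro l
    cases l with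
    | nil => simp [rep1]
    | cons c t =>
      rw [rep1]
      by_cases h : ['.', '.'].isPrefixOf (c :: t) = true
      · have h1 := ih t.tail
        have h2 : t.tail.length ≤ t.length := by
          cases t <;> simp
        simp only [h, if_true, List.length_cons]
        omega
      · simp only [Bool.not_eq_true] at h
        have h1 := ih t
        simp only [h, Bool.false_eq_true, if_false, List.length_cons]
        omega

theorem rep1_length_lt : ∀ (fuel : Nat) (l : List Char), ['.', '.'] <:+: l →
    l.length ≤ fuel → (rep1 fuel l).length < l.length := by
  intro fuel
  induction fuel with
  | zero =>
    intro l h hle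
    have : l = [] := List.eq_nil_of_length_eq_zero (by omega)
    subst this
    simp at h
  | succ fuel ih =>
    intro l h hle
    cases l with
    | nil => simp at h
    | cons c t =>
      rw [rep1]
      by_cases hp : ['.', '.'].isPrefixOf (c :: t) = true
      · have hpre : ['.', '.'] <+: (c :: t) := List.isPrefixOf_iff_prefix.mp hp
        obtain ⟨u, hu⟩ := hpre
        have ht : t = '.' :: u := by cases hu; rfl
        subst ht
        have h1 := rep1_length_le fuel u
        simp only [hp, if_true, List.length_cons, List.tail_cons]
        omega
      · simp only [Bool.not_eq_true] at hp
        have hnp : ¬ ['.', '.'] <+: (c :: t) := by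
          intro hc
          rw [← List.isPrefixOf_iff_prefix] at hc
          simp [hp] at hc
        have hti : ['.', '.'] <:+: t := by
          rcases List.infix_cons_iff.mp h with h1 | h1
          · exact absurd h1 hnp
          · exact h1
        have h2 := ih t hti (by simp at hle; omega)
        simp only [hp, Bool.false_eq_true, if_false, List.length_cons]
        omega

-- while ".." in answer: answer = answer.replace("..", ".")
def whileA (l : List Char) : List Char :=
  if h : PySem.Chars.isIn ['.', '.'] l = true then
    whileA (PySem.Chars.replace l ['.', '.'] ['.'])
  else l
termination_by l.length
decreasing_by
  rw [replace_eq_rep1]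
  exact rep1_length_lt l.length l ((PySem.Chars.isIn_iff_infix _ _).mp h) le_rfl

-- while len(answer) < 3: answer += answer[-1]   (answer[-1] on an empty list would raise in
-- Python; that state is unreachable from solution's flow, the port returns l there to be total)
def padA (l : List Char) : List Char :=
  if l.length < 3 then
    match PySem.List.pyGet? l (-1) with
    | some c => padA (l ++ [c])
    | none => l
  else l
termination_by 3 - l.length
decreasing_by simp; omega

def solution (new_id : String) : String :=
  let lowered := PySem.Chars.lower new_id.toList
  let ans := lowered.foldl
    (fun acc c => if PySem.Chars.isalnum c || ['-', '_', '.'].contains c then acc ++ [c] else acc) []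
  let ans := whileA ans
  let ans := if PySem.Chars.startswith ans ['.'] then PySem.List.slice ans (some 1) none else ans
  let ans := if PySem.Chars.endswith ans ['.'] then PySem.List.slice ans none (some (-1)) else ans
  let ans := if ans.length = 0 then ['a'] else ans
  let ans := if ans.length > 15 then PySem.List.slice ans none (some 15) else ans
  let ans := if PySem.List.pyGet? ans (-1) = some '.' then PySem.List.slice ans none (some (-1)) else ans
  let ans := padA ans
  String.mk ans

-- ===== PORT B =====
-- one pass: filter + consecutive-dot collapse, tracking the last appended char (none = Python's '')
def fusedB (l : List Char) : List Char × Option Char :=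
  l.foldl
    (fun st ch =>
      if PySem.Chars.isalnum ch || ['-', '_', '.'].contains ch then
        if ch = '.' ∧ st.2 = some '.' then st
        else (st.1 ++ [ch], some ch)
      else st)
    ([], none)

def solution_alt (new_id : String) : String :=
  let s := (fusedB (PySem.Chars.lower new_id.toList)).1
  let s := PySem.Chars.stripChars s ['.']
  let s := if s = [] then ['a'] else s
  let s := PySem.Chars.slice s none (some 15)
  -- s.rstrip('.') ported by hand (exact): drop '.'-chars from the reversed list
  let s := (List.dropWhile (fun c => ['.'].contains c) s.reverse).reverse
  let s := if s.length < 3 then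
      match PySem.List.pyGet? s (-1) with
      | some c => s ++ List.replicate (3 - s.length) c
      | none => s
    else s
  String.mk s

-- ===== PRECONDITION & SPEC =====
def Spec_solution (new_id : String) (out : String) : Prop := out = solution_alt new_id
instance (new_id : String) (out : String) : Decidable (Spec_solution new_id out) := by unfold Spec_solution; infer_instance

-- ===== CLAIM (what is proved, stated in full; the proofs are below) =====
def Claim_equal_solution : Prop := ∀ (new_id : String), Dom_solution new_id → Spec_solution new_id (solution new_id)

-- ===== LEMMAS AND PROOFS =====

-- collapse of consecutive dots with state b = "the last emitted char was '.'"
def col : Bool → List Char → List Char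
  | _, [] => []
  | b, c :: t =>
    if c = '.' then (if b then col true t else '.' :: col true t) else c :: col false t

theorem col_rep1 : ∀ (fuel : Nat) (b : Bool) (l : List Char), col b (rep1 fuel l) = col b l := by
  intro fuel
  induction fuel with
  | zero => intro b l; rfl
  | succ fuel ih =>
    intro b l
    cases l with
    | nil => rfl
    | cons c t =>
      rw [rep1]
      by_cases hp : ['.', '.'].isPrefixOf (c :: t) = true
      · have hpre := List.isPrefixOf_iff_prefix.mp hp
        obtain ⟨u, hu⟩ := hpre
        have hc : c = '.' := by cases hu; rfl
        have ht : t = '.' :: u := by cases hu; rfl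
        subst hc; subst ht
        simp only [hp, if_true, List.tail_cons]
        cases b <;> simp [col, ih]
      · simp only [Bool.not_eq_true] at hp
        simp only [hp, Bool.false_eq_true, if_false]
        by_cases hc : c = '.'
        · subst hc; cases b <;> simp [col, ih]
        · simp [col, hc, ih]

theorem col_no_ddot : ∀ (l : List Char) (b : Bool),
    ¬ ['.', '.'] <:+: col b l ∧ (b = true → (col b l).head? ≠ some '.') := by
  intro l
  induction l with
  | nil => intro b; simp [col]
  | cons c t ih =>
    intro b
    by_cases hc : c = '.'
    · subst hc
      cases b with
      | true =>
        simp only [col, if_true]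
        exact ⟨(ih true).1, fun _ => (ih true).2 rfl⟩
      | false =>
        constructor
        · simp only [col, if_pos rfl, Bool.false_eq_true, if_false]
          intro hinf
          rcases List.infix_cons_iff.mp hinf with h1 | h1
          · obtain ⟨u, hu⟩ := h1
            have : (col true t).head? = some '.' := by
              cases hx : col true t with
              | nil => rw [hx] at hu; simp at hu
              | cons d v =>
                rw [hx] at hu
                simp at hu
                simp [hu.1.symm]
            exact (ih true).2 rfl this
          · exact (ih true).1 h1
        · simp
    · constructor
      · simp only [col, if_neg hc]
        intro hinf
        rcases List.infix_cons_iff.mp hinf with h1 | h1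
        · obtain ⟨u, hu⟩ := h1
          simp at hu
          exact hc hu.1.symm
        · exact (ih false).1 h1
      · intro _
        simp [col, hc]

theorem col_id : ∀ (l : List Char) (b : Bool), ¬ ['.', '.'] <:+: l →
    (b = true → l.head? ≠ some '.') → col b l = l := by
  intro l
  induction l with
  | nil => intro b _ _; rfl
  | cons c t ih =>
    intro b hn hh
    have hti : ¬ ['.', '.'] <:+: t := fun h => hn (h.trans (List.suffix_cons c t).isInfix)
    by_cases hc : c = '.'
    · subst hc
      have hb : b = false := by
        cases b
        · rfl
        · exact absurd (hh rfl) (by simp)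
      subst hb
      simp only [col, if_pos rfl, Bool.false_eq_true, if_false]
      have hth : t.head? ≠ some '.' := by
        intro hth
        cases t with
        | nil => simp at hth
        | cons d v =>
          simp at hth
          subst hth
          exact hn ⟨[], v, rfl⟩
      rw [ih true hti (fun _ => hth)]
      simp
    · simp only [col, if_neg hc]
      rw [ih false hti (by simp)]

theorem whileA_eq_col (l : List Char) : whileA l = col false l := by
  rw [whileA]
  by_cases h : PySem.Chars.isIn ['.', '.'] l = true
  · rw [dif_pos h]
    rw [whileA_eq_col (PySem.Chars.replace l ['.', '.'] ['.'])]
    rw [replace_eq_rep1, col_rep1]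
  · rw [dif_neg h]
    simp only [Bool.not_eq_true] at h
    exact (col_id l false ((PySem.Chars.isIn_eq_false_iff _ _).mp h) (by simp)).symm
termination_by l.length
decreasing_by
  rw [replace_eq_rep1]
  exact rep1_length_lt l.length l ((PySem.Chars.isIn_iff_infix _ _).mp h) le_rfl

theorem fused_eq_col (p : Char → Bool) : ∀ (l : List Char) (acc : List Char) (prev : Option Char),
    (l.foldl
      (fun st ch =>
        if p ch then
          if ch = '.' ∧ st.2 = some '.' then st
          else (st.1 ++ [ch], some ch)
        else st)
      (acc, prev)).1 = acc ++ col (prev == some '.') (l.filter p) := by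
  intro l
  induction l with
  | nil => intro acc prev; simp [col]
  | cons ch t ih =>
    intro acc prev
    simp only [List.foldl_cons, List.filter_cons]
    by_cases hp : p ch = true
    · simp only [hp, if_true]
      by_cases hd : ch = '.' ∧ prev = some '.'
      · rw [if_pos hd]
        rw [ih]
        obtain ⟨h1, h2⟩ := hd
        subst h1; subst h2
        simp [col]
      · rw [if_neg hd]
        rw [ih]
        by_cases hc : ch = '.'
        · subst hc
          have hprev : prev ≠ some '.' := fun h => hd ⟨rfl, h⟩
          have : (prev == some '.') = false := by
            cases prev with
            | none => rfl
            | some c =>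
              simp
              intro h; exact hprev (by rw [h])
          simp [col, this]
        · have : (some ch == some '.') = false := by simp [hc]
          simp [col, hc, this]
    · simp only [Bool.not_eq_true] at hp
      simp [hp, ih]

theorem dropWhile_dot (r : List Char) (h : ¬ ['.', '.'] <:+: r) :
    List.dropWhile (fun c => ['.'].contains c) r = if r.head? = some '.' then r.tail else r := by
  cases r with
  | nil => simp
  | cons c t =>
    by_cases hc : c = '.'
    · subst hc
      have hth : t.head? ≠ some '.' := by
        intro hth
        cases t with
        | nil => simp at hth
        | cons d v =>
          simp at hth; subst hth
          exact h ⟨[], v, rfl⟩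
      rw [List.dropWhile_cons]
      cases t with
      | nil => simp
      | cons d v =>
        have hd : d ≠ '.' := by intro hd; exact hth (by simp [hd])
        simp [List.dropWhile_cons, hd]
    · simp [List.dropWhile_cons, hc]

theorem rstrip_dot (a : List Char) (h : ¬ ['.', '.'] <:+: a) :
    (List.dropWhile (fun c => ['.'].contains c) a.reverse).reverse =
      if a.getLast? = some '.' then a.dropLast else a := by
  have hrev : ¬ ['.', '.'] <:+: a.reverse := by
    intro hr
    exact h (List.reverse_infix.mp (by simpa using hr))
  rw [dropWhile_dot a.reverse hrev]
  rw [List.head?_reverse]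
  by_cases hl : a.getLast? = some '.'
  · simp only [hl, if_pos rfl]
    rcases List.eq_nil_or_concat a with hA | ⟨l', x, hA⟩ <;> subst hA
    · simp
    · simp [List.dropLast_concat]
  · simp [hl]

theorem startswith_dot (r : List Char) :
    (if PySem.Chars.startswith r ['.'] then PySem.List.slice r (some 1) none else r) =
      if r.head? = some '.' then r.tail else r := by
  cases r with
  | nil => simp [PySem.Chars.startswith, List.isPrefixOf]
  | cons c t =>
    by_cases hc : c = '.'
    · subst hc
      simp [PySem.Chars.startswith, List.isPrefixOf, PySem.List.slice_from_one]
    · simp [PySem.Chars.startswith, List.isPrefixOf, hc]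
      intro h; exact absurd h.symm hc

theorem endswith_dot (a : List Char) :
    (if PySem.Chars.endswith a ['.'] then PySem.List.slice a none (some (-1)) else a) =
      if a.getLast? = some '.' then a.dropLast else a := by
  have he : PySem.Chars.endswith a ['.'] = true ↔ a.getLast? = some '.' := by
    rw [PySem.Chars.endswith_iff]
    constructor
    · intro ⟨u, hu⟩
      subst hu
      simp
    · intro hl
      rcases List.eq_nil_or_concat a with hA | ⟨l', x, hA⟩ <;> subst hA
      · simp at hl
      · simp at hl
        subst hl
        exact ⟨l', by simp⟩
  by_cases hl : a.getLast? = some '.'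
  · rw [if_pos (he.mpr hl), if_pos hl, PySem.List.slice_to_neg_one]
  · rw [if_neg (fun hx => hl (he.mp hx)), if_neg hl]

theorem strip_eq (r : List Char) (h : ¬ ['.', '.'] <:+: r) :
    (if PySem.Chars.endswith
          (if PySem.Chars.startswith r ['.'] then PySem.List.slice r (some 1) none else r) ['.'] then
       PySem.List.slice
          (if PySem.Chars.startswith r ['.'] then PySem.List.slice r (some 1) none else r)
          none (some (-1))
     else if PySem.Chars.startswith r ['.'] then PySem.List.slice r (some 1) none else r) =
      PySem.Chars.stripChars r ['.'] := by
  rw [startswith_dot, endswith_dot]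
  rw [PySem.Chars.stripChars]
  rw [dropWhile_dot r h]
  have ha : ¬ ['.', '.'] <:+: (if r.head? = some '.' then r.tail else r) := by
    split_ifs
    · exact fun hx => h (hx.trans (List.tail_suffix r).isInfix)
    · exact h
  rw [rstrip_dot _ ha]

theorem no_ddot_strip (r : List Char) (h : ¬ ['.', '.'] <:+: r) :
    ¬ ['.', '.'] <:+: PySem.Chars.stripChars r ['.'] := by
  intro hc
  apply h
  rw [PySem.Chars.stripChars] at hc
  have h1 : List.dropWhile (fun c => (['.'] : List Char).contains c) r <:+ r :=
    List.dropWhile_suffix _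
  have h2 :
      List.dropWhile (fun c => (['.'] : List Char).contains c)
          (List.dropWhile (fun c => (['.'] : List Char).contains c) r).reverse <:+
        (List.dropWhile (fun c => (['.'] : List Char).contains c) r).reverse :=
    List.dropWhile_suffix _
  have h3 := (List.reverse_prefix).mpr h2
  simp only [List.reverse_reverse] at h3
  exact hc.trans (h3.isInfix.trans h1.isInfix)

theorem trunc_eq (s : List Char) (hs : ¬ ['.', '.'] <:+: s) :
    (if PySem.List.pyGet? (if s.length > 15 then PySem.List.slice s none (some 15) else s) (-1) =
         some '.' then
       PySem.List.slice (if s.length > 15 then PySem.List.slice s none (some 15) else s)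
         none (some (-1))
     else if s.length > 15 then PySem.List.slice s none (some 15) else s) =
      (List.dropWhile (fun c => ['.'].contains c) (PySem.Chars.slice s none (some 15)).reverse).reverse := by
  have hsl : PySem.List.slice s none (some 15) = s.take 15 := by
    rw [PySem.List.slice_to s (by norm_num : (0:Int) ≤ 15)]
    rfl
  have htk : (if s.length > 15 then PySem.List.slice s none (some 15) else s) = s.take 15 := by
    split_ifs with h15
    · exact hsl
    · rw [List.take_of_length_le (by omega)]
  rw [htk]
  have hnt : ¬ ['.', '.'] <:+: s.take 15 := fun hx => hs (hx.trans (List.take_prefix 15 s).isInfix)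
  rw [PySem.Chars.slice_eq_listSlice, hsl, rstrip_dot _ hnt]
  rw [PySem.List.pyGet?_neg_one]
  by_cases hl : (s.take 15).getLast? = some '.'
  · rw [if_pos hl, if_pos hl, PySem.List.slice_to_neg_one]
  · rw [if_neg hl, if_neg hl]

theorem pad_eq (l : List Char) :
    padA l = if l.length < 3 then
        (match PySem.List.pyGet? l (-1) with
          | some c => l ++ List.replicate (3 - l.length) c
          | none => l)
      else l := by
  by_cases h3 : l.length < 3
  · cases l with
    | nil =>
      rw [padA.eq_def]
      simp [PySem.List.pyGet?, PySem.List.pyIdx?]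
    | cons a t =>
      cases t with
      | nil =>
        rw [padA.eq_def]
        simp only [PySem.List.pyGet?_neg_one, List.getLast?_singleton]
        rw [padA.eq_def]
        simp only [PySem.List.pyGet?_neg_one]
        simp [List.replicate]
        rw [padA.eq_def]
        simp
      | cons b u =>
        cases u with
        | nil =>
          rw [padA.eq_def]
          simp only [PySem.List.pyGet?_neg_one]
          simp [List.replicate]
          rw [padA.eq_def]
          simp
        | cons c v =>
          simp at h3
          omega
  · rw [padA.eq_def]
    simp [h3]

-- ===== VERDICT (by name: the statement is the Claim_ definition above) =====
set_option maxHeartbeats 1000000 in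
theorem solution_spec : Claim_equal_solution := by
  unfold Claim_equal_solution
  intro new_id _
  unfold Spec_solution solution solution_alt fusedB
  simp only []
  rw [PySem.List.foldl_append_if
        (fun c => PySem.Chars.isalnum c || ['-', '_', '.'].contains c) (fun c => c)]
  rw [fused_eq_col (fun c => PySem.Chars.isalnum c || ['-', '_', '.'].contains c)]
  have hnone : ((none : Option Char) == some '.') = false := rfl
  simp only [hnone, List.nil_append, List.map_id_fun', id]
  rw [whileA_eq_col]
  set r := col false
      ((PySem.Chars.lower new_id.toList).filter
        (fun c => PySem.Chars.isalnum c || ['-', '_', '.'].contains c)) with hr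
  have hnd : ¬ ['.', '.'] <:+: r := (col_no_ddot _ false).1
  rw [strip_eq r hnd]
  have hs0 : ∀ x : List Char, (if x.length = 0 then (['a'] : List Char) else x) =
      (if x = [] then ['a'] else x) := by
    intro x
    simp [List.length_eq_zero_iff]
  rw [hs0]
  set s := if PySem.Chars.stripChars r ['.'] = [] then (['a'] : List Char)
    else PySem.Chars.stripChars r ['.'] with hsdef
  have hnds : ¬ ['.', '.'] <:+: s := by
    rw [hsdef]
    split_ifs
    · decide
    · exact no_ddot_strip r hnd
  rw [trunc_eq s hnds]
  rw [pad_eq]
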